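-- pv_equiv track=rewrite | github.com/Waseem0912-coder/fled_page_version_cl | src/livedoc/stages/compress.py | _find_protected_sources
-- ===== SOURCE A (Python) =====
-- from typing import Any, Dict, List, Set
--
-- def _find_protected_sources(
--
--     items: List[str],
--     protected_terms: Set[str],
-- ) -> Dict[str, str]:
--     """Find which original items contain each protected term.
--
--     Args:
--         items: Original items list.
--         protected_terms: Terms to find.
--
--     Returns:
--         Dict mapping protected term to original item containing it.
--     """
--     sources = {}
--     for term in protected_terms:
--         term_lower = term.lower()
--         for item in items:
--             # Ensure item is a string
--             item_str = str(item) if not isinstance(item, str) else item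
--             if term_lower in item_str.lower():
--                 sources[term] = item_str
--                 break
--     return sources
-- ===== SOURCE B (Python) =====
-- # B: single pass over items maintaining the set of still-unmatched terms,
-- # then emit the mapping in protected_terms order (alternative decomposition).
-- def _find_protected_sources(items, protected_terms):
--     found = {}
--     remaining = set(protected_terms)
--     for item in items:
--         item_str = item if isinstance(item, str) else str(item)
--         low = item_str.lower()
--         for t in list(remaining):
--             if t.lower() in low:
--                 found[t] = item_str
--                 remaining.discard(t)
--     return {t: found[t] for t in protected_terms if t in found}
-- ===== Notes on version B (the rewrite author's own statement) =====
-- stated objective: alternative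
-- what changed: Inverted the loop nesting: instead of scanning all items per term (term-outer, break on first hit), B makes one pass over items while maintaining a set of still-unmatched terms, then emits the term->first-item map in term order.
import Mathlib
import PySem

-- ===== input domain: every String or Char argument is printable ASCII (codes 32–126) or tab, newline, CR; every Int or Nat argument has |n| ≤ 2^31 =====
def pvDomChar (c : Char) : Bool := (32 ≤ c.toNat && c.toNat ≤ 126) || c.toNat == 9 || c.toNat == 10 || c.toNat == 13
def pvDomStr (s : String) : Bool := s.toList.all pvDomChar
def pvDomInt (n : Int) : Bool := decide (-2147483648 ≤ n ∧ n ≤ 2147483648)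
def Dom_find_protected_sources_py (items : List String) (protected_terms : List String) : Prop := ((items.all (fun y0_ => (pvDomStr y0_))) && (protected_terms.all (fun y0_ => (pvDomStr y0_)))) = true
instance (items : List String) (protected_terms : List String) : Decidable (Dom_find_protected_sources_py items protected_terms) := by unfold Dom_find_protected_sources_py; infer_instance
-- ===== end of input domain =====

-- B inverts the loop nesting: one pass over items with a shrinking set of unmatched terms,
-- emitting the term->first-item map in term order (alternative decomposition, same cost).


-- ===== PORT A =====
-- inner 'for item in items: … break' loop of A (item_str = item since items are strings)
def pvInnerA (term term_lower : String) (items : List String) (sources : PySem.Dict String String) : PySem.Dict String String :=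
  match items with
  | [] => sources
  | item :: rest =>
      if PySem.Str.isIn term_lower (PySem.Str.lower item) then sources.insert term item
      else pvInnerA term term_lower rest sources

def find_protected_sources_py (items : List String) (protected_terms : List String) : List (String × String) :=
  (protected_terms.foldl (fun sources term => pvInnerA term (PySem.Str.lower term) items sources) PySem.Dict.empty).items

-- ===== PORT B =====
-- one pass over items: for each item, record hits among the still-unmatched terms and drop them
def pvScanB (items : List String) (found : PySem.Dict String String) (remaining : List String) : PySem.Dict String String :=
  match items with
  | [] => found
  | item :: rest =>
      let low := PySem.Str.lower item
      let found' := remaining.foldl (fun f t => if PySem.Str.isIn (PySem.Str.lower t) low then f.insert t item else f) found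
      let remaining' := remaining.filter (fun t => !(PySem.Str.isIn (PySem.Str.lower t) low))
      pvScanB rest found' remaining'

def find_protected_sources_py_alt (items : List String) (protected_terms : List String) : List (String × String) :=
  let found := pvScanB items PySem.Dict.empty (PySem.Set.ofList protected_terms)
  (protected_terms.foldl (fun out t =>
      match found.get? t with
      | some v => out.insert t v
      | none => out) PySem.Dict.empty).items

-- ===== PRECONDITION & SPEC =====
def Spec_find_protected_sources_py (items : List String) (protected_terms : List String) (out : List (String × String)) : Prop := out = find_protected_sources_py_alt items protected_terms
instance (items : List String) (protected_terms : List String) (out : List (String × String)) : Decidable (Spec_find_protected_sources_py items protected_terms out) := by unfold Spec_find_protected_sources_py; infer_instance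

-- ===== CLAIM (what is proved, stated in full; the proofs are below) =====
def Claim_equal_find_protected_sources_py : Prop := ∀ (items : List String) (protected_terms : List String), Dom_find_protected_sources_py items protected_terms → Spec_find_protected_sources_py items protected_terms (find_protected_sources_py items protected_terms)

-- ===== LEMMAS AND PROOFS =====

-- first item whose lowercase contains tl (proof-side characterisation)
def pvFirstHit (tl : String) : List String → Option String
  | [] => none
  | item :: rest => if PySem.Str.isIn tl (PySem.Str.lower item) then some item else pvFirstHit tl rest

theorem pvInnerA_eq (term tl : String) (items : List String) (s : PySem.Dict String String) :
    pvInnerA term tl items s = match pvFirstHit tl items with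
      | some it => s.insert term it
      | none => s := by
  induction items with
  | nil => rfl
  | cons item rest ih =>
      simp only [pvInnerA, pvFirstHit]
      split_ifs <;> simp [ih]

theorem pvFoldB_get? (p : String → Bool) (item : String) (rem : List String)
    (f : PySem.Dict String String) (t : String) :
    (rem.foldl (fun f u => if p u then f.insert u item else f) f).get? t =
      if t ∈ rem ∧ p t = true then some item else f.get? t := by
  induction rem generalizing f with
  | nil => simp
  | cons r rs ih =>
      rw [List.foldl_cons, ih]
      by_cases h2 : t ∈ rs ∧ p t = true
      · rw [if_pos h2, if_pos ⟨List.mem_cons_of_mem r h2.1, h2.2⟩]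
      · rw [if_neg h2]
        by_cases hr : p r = true
        · rw [if_pos hr]
          by_cases h3 : t = r
          · subst h3
            rw [PySem.Dict.get?_insert_self, if_pos ⟨List.mem_cons_self, hr⟩]
          · rw [PySem.Dict.get?_insert, if_neg h3]
            have : ¬ (t ∈ r :: rs ∧ p t = true) := by
              rintro ⟨hm, hp⟩
              rcases List.mem_cons.mp hm with h | h
              · exact h3 h
              · exact h2 ⟨h, hp⟩
            rw [if_neg this]
        · rw [if_neg hr]
          have : ¬ (t ∈ r :: rs ∧ p t = true) := by
            rintro ⟨hm, hp⟩
            rcases List.mem_cons.mp hm with h | h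
            · exact hr (h ▸ hp)
            · exact h2 ⟨h, hp⟩
          rw [if_neg this]

theorem pvScanB_get? (items : List String) (f : PySem.Dict String String) (rem : List String) (t : String) :
    (pvScanB items f rem).get? t =
      Option.or (if t ∈ rem then pvFirstHit (PySem.Str.lower t) items else none) (f.get? t) := by
  induction items generalizing f rem with
  | nil =>
      by_cases hmem : t ∈ rem
      · rw [if_pos hmem]; rfl
      · rw [if_neg hmem]; rfl
  | cons item rest ih =>
      simp only [pvScanB]
      rw [ih, pvFoldB_get? (fun u => PySem.Str.isIn (PySem.Str.lower u) (PySem.Str.lower item))]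
      by_cases hmem : t ∈ rem
      · by_cases hp : PySem.Str.isIn (PySem.Str.lower t) (PySem.Str.lower item) = true
        · have hfil : t ∉ rem.filter (fun u => !(PySem.Str.isIn (PySem.Str.lower u) (PySem.Str.lower item))) := by
            intro hc
            rw [List.mem_filter] at hc
            have hb := hc.2
            rw [Bool.not_eq_true'] at hb
            exact absurd hp (by rw [hb]; exact Bool.false_ne_true)
          rw [if_neg hfil, if_pos hmem, if_pos ⟨hmem, hp⟩]
          simp only [pvFirstHit, if_pos hp, Option.none_or, Option.some_or]
        · have hfil : t ∈ rem.filter (fun u => !(PySem.Str.isIn (PySem.Str.lower u) (PySem.Str.lower item))) := by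
            rw [List.mem_filter]
            exact ⟨hmem, by rw [Bool.not_eq_true']; exact Bool.eq_false_iff.mpr hp⟩
          rw [if_pos hfil, if_pos hmem, if_neg (fun h => hp h.2)]
          simp only [pvFirstHit, if_neg hp]
      · have hfil : t ∉ rem.filter (fun u => !(PySem.Str.isIn (PySem.Str.lower u) (PySem.Str.lower item))) :=
          fun hc => hmem (List.mem_of_mem_filter hc)
        rw [if_neg hfil, if_neg hmem, if_neg (fun h => hmem h.1)]

-- ===== VERDICT (by name: the statement is the Claim_ definition above) =====
theorem find_protected_sources_py_spec : Claim_equal_find_protected_sources_py := by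
  intro items protected_terms _
  show find_protected_sources_py items protected_terms = find_protected_sources_py_alt items protected_terms
  simp only [find_protected_sources_py, find_protected_sources_py_alt]
  congr 1
  apply PySem.List.foldl_congr_mem
  intro acc term hmem
  rw [pvInnerA_eq, pvScanB_get?,
    if_pos ((PySem.Set.mem_ofList protected_terms term).mpr hmem)]
  cases pvFirstHit (PySem.Str.lower term) items <;> simp [PySem.Dict.get?_empty]
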